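-- pv_equiv track=rewrite | github.com/rocha30/Proyecto1_Teoria | Main_old.py | handle_escaped_chars
-- ===== SOURCE A (Python) =====
-- def handle_escaped_chars(regex):
--     result, i = "", 0
--     escaped_chars = {'(', ')', '[', ']', '{', '}', '.', '*', '+', '?', '|', '^'}
--
--     while i < len(regex):
--         if regex[i] == '\\' and i + 1 < len(regex):
--             next_char = regex[i + 1]
--             if next_char in escaped_chars:
--                 result += f"L{next_char}"
--             elif next_char == 'n':
--                 result += "Ln"
--             else:
--                 result += next_char
--             i += 2
--         else:
--             result += regex[i]
--             i += 1
--     return result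
-- ===== SOURCE B (Python) =====
-- import re
--
-- _ESCAPED = {'(', ')', '[', ']', '{', '}', '.', '*', '+', '?', '|', '^', 'n'}
--
-- def _repl(m):
--     c = m.group(1)
--     return 'L' + c if c in _ESCAPED else c
--
-- def handle_escaped_chars(regex):
--     return re.sub(r'\\(.)', _repl, regex, flags=re.DOTALL)
-- ===== Notes on version B (the rewrite author's own statement) =====
-- stated objective: faster
-- what changed: Replaced the manual index-advancing while loop with quadratic string concatenation by a single re.sub(r'\\(.)', repl, regex, flags=re.DOTALL) call whose callback maps the escaped character.
import Mathlib
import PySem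

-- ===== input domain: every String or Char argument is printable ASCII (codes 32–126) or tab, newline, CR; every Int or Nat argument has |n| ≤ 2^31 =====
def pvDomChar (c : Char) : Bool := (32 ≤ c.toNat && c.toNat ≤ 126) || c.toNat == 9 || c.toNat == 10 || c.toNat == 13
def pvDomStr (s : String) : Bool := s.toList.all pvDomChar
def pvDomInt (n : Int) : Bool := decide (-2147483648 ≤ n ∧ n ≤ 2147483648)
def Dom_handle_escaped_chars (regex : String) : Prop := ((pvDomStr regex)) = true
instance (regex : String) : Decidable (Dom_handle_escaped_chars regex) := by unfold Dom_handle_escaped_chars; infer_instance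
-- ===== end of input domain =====

-- B replaces A's manual index-advancing while loop by one regex substitution pass (idiomatic).

-- ===== PORT A =====
-- the set {'(',')','[',']','{','}','.','*','+','?','|','^'}
def hecEscapedSet : List Char := ['(', ')', '[', ']', '{', '}', '.', '*', '+', '?', '|', '^']

-- A's while loop: `res` is the accumulated result string, the list is regex[i:].
-- `regex[i] == '\\' and i + 1 < len(regex)` is: head is '\' and the tail is nonempty.
def hecLoop : List Char → List Char → List Char
  | res, [] => res
  | res, c :: rest =>
    if c = '\\' then
      match rest with
      | next :: rest' =>
        if hecEscapedSet.contains next then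
          hecLoop (res ++ ['L', next]) rest'          -- result += f"L{next_char}"
        else if next = 'n' then
          hecLoop (res ++ ['L', 'n']) rest'           -- result += "Ln"
        else
          hecLoop (res ++ [next]) rest'               -- result += next_char
      | [] => hecLoop (res ++ [c]) []                 -- i+1 < len fails: result += regex[i]
    else
      hecLoop (res ++ [c]) rest                       -- result += regex[i]

def handle_escaped_chars (regex : String) : String :=
  String.ofList (hecLoop [] regex.toList)

-- ===== PORT B =====
-- Source B's replacement callback: 'L'+c if c in _ESCAPED else c
def hecRepl (c : Char) : List Char :=
  if (['(', ')', '[', ']', '{', '}', '.', '*', '+', '?', '|', '^', 'n'] : List Char).contains c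
  then ['L', c] else [c]

-- Hand port of re.sub(r'\\(.)', _repl, regex, flags=re.DOTALL): exact, because with
-- DOTALL the pattern matches a backslash followed by ANY one character, re.sub scans
-- left to right with non-overlapping matches, and unmatched characters are copied.
def hecSub : List Char → List Char
  | [] => []
  | '\\' :: c :: rest => hecRepl c ++ hecSub rest
  | c :: rest => c :: hecSub rest

def handle_escaped_chars_alt (regex : String) : String :=
  String.ofList (hecSub regex.toList)

-- ===== PRECONDITION & SPEC =====
def Spec_handle_escaped_chars (regex : String) (out : String) : Prop := out = handle_escaped_chars_alt regex
instance (regex : String) (out : String) : Decidable (Spec_handle_escaped_chars regex out) := by unfold Spec_handle_escaped_chars; infer_instance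

-- ===== CLAIM (what is proved, stated in full; the proofs are below) =====
def Claim_equal_handle_escaped_chars : Prop := ∀ (regex : String), Dom_handle_escaped_chars regex → Spec_handle_escaped_chars regex (handle_escaped_chars regex)

-- ===== LEMMAS AND PROOFS =====

theorem hecSub_cons_ne (c : Char) (r : Char) (rs : List Char) (hc : c ≠ '\\') :
    hecSub (c :: r :: rs) = c :: hecSub (r :: rs) := by
  rw [hecSub]
  · intro c' rest' hce _; exact hc hce

theorem hecLoop_eq (l : List Char) : ∀ res, hecLoop res l = res ++ hecSub l := by
  induction l using hecSub.induct with
  | case1 => intro res; simp [hecLoop, hecSub]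
  | case2 c rest ih =>
    intro res
    simp only [hecLoop, hecSub, hecRepl, hecEscapedSet]
    split_ifs with h1 h2 <;> simp_all
  | case3 c rest h1 ih =>
    -- c :: rest where not ('\\' followed by something): either c ≠ '\\', or rest = []
    intro res
    by_cases hc : c = '\\'
    · subst hc
      cases rest with
      | nil => simp [hecLoop, hecSub]
      | cons r rs => exact (h1 r rs rfl rfl).elim
    · cases rest with
      | nil => simp [hecLoop, hecSub, hc]
      | cons r rs => simp [hecLoop, hc, ih, hecSub_cons_ne _ _ _ hc]

-- ===== VERDICT (by name: the statement is the Claim_ definition above) =====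
theorem handle_escaped_chars_spec : Claim_equal_handle_escaped_chars := by
  intro regex _
  unfold Spec_handle_escaped_chars handle_escaped_chars handle_escaped_chars_alt
  rw [hecLoop_eq, List.nil_append]
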